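-- pv_equiv track=rewrite | github.com/TheDaniel166/IsopGem | scripts/attic/visualize_constellation_preview.py | render_asterism_cardinal
-- ===== SOURCE A (Python) =====
-- def render_asterism_cardinal(grid):
--     height = len(grid)
--     width = len(grid[0])
--
--     # Canvas size: (Height * 2 - 1) x (Width * 2 - 1)
--     # Actually, let's just use simple mapping
--     # Rows will be: StarRow, LinkRow, StarRow...
--
--     output_lines = []
--
--     for y in range(height):
--         # 1. Star Row
--         row_str = ""
--         for x in range(width):
--             if grid[y][x]:
--                 row_str += "★"
--             else:
--                 row_str += "·"
--
--             # Check East connection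
--             if x < width - 1:
--                 if grid[y][x] and grid[y][x+1]:
--                     row_str += "──"
--                 else:
--                     row_str += "  "
--         output_lines.append(row_str)
--
--         # 2. Vertical Link Row (if not last row)
--         if y < height - 1:
--             link_row_str = ""
--             for x in range(width):
--                 # Check South connection
--                 if grid[y][x] and grid[y+1][x]:
--                     link_row_str += "│"
--                 else:
--                     link_row_str += " "
--
--                 # Spacer between vertical links
--                 if x < width - 1:
--                     link_row_str += "  "
--             output_lines.append(link_row_str)
--
--     return "\n".join(output_lines)
-- ===== SOURCE B (Python) =====
-- def render_asterism_cardinal(grid):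
--     height = len(grid)
--     width = len(grid[0])
--
--     def cell(r, c):
--         y, x = r // 2, c // 3
--         if r % 2 == 0:
--             if c % 3 == 0:
--                 return "★" if grid[y][x] else "·"
--             return "─" if grid[y][x] and grid[y][x + 1] else " "
--         if c % 3 == 0:
--             return "│" if grid[y][x] and grid[y + 1][x] else " "
--         return " "
--
--     return "\n".join(
--         "".join(cell(r, c) for c in range(3 * width - 2))
--         for r in range(2 * height - 1)
--     )
-- ===== Notes on version B (the rewrite author's own statement) =====
-- stated objective: alternative
-- what changed: Replaces the interleaved incremental string-building loops (star rows and link rows accumulated piecewise) with a coordinate formula: one cell function (r,c) -> char over the 2h-1 x 3w-2 canvas, rendered by two comprehensions.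
import Mathlib
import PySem

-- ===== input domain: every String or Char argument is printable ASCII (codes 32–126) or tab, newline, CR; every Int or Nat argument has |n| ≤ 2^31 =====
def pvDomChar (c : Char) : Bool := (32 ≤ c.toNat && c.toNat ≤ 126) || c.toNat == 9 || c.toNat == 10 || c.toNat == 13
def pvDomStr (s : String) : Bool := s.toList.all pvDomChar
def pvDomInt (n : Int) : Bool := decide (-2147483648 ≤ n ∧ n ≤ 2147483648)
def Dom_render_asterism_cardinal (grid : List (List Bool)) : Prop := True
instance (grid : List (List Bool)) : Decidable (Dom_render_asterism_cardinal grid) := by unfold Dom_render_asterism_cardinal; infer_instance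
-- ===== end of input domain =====

-- B renders the same picture from a per-coordinate cell formula over the (2h-1)x(3w-2) canvas
-- instead of A's interleaved incremental string building (objective: alternative decomposition).

-- shared indexing helper: grid[y][x] as a total function (Pre_ keeps all reads in range)
def pvAt (grid : List (List Bool)) (y x : Int) : Bool :=
  PySem.List.pyGetD (PySem.List.pyGetD grid y []) x false

-- ===== PORT A =====
-- the body of A's inner star-row loop (named so the fold can be reasoned about; same code)
def pvAStarStep (grid : List (List Bool)) (width y : Int) (s : List Char) (x : Int) : List Char :=
  let s := if pvAt grid y x then s ++ ['★'] else s ++ ['·']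
  if x < width - 1 then
    if pvAt grid y x && pvAt grid y (x + 1) then s ++ ['─', '─']
    else s ++ [' ', ' ']
  else s

-- the body of A's inner vertical-link loop
def pvALinkStep (grid : List (List Bool)) (width y : Int) (s : List Char) (x : Int) : List Char :=
  let s := if pvAt grid y x && pvAt grid (y + 1) x then s ++ ['│'] else s ++ [' ']
  if x < width - 1 then s ++ [' ', ' '] else s

-- the body of A's outer row loop
def pvAOuterStep (grid : List (List Bool)) (height width : Int)
    (lines : List (List Char)) (y : Int) : List (List Char) :=
  let row_str : List Char := (PySem.List.pyRange 0 width).foldl (pvAStarStep grid width y) []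
  let lines := lines ++ [row_str]
  if y < height - 1 then
    let link_row_str : List Char :=
      (PySem.List.pyRange 0 width).foldl (pvALinkStep grid width y) []
    lines ++ [link_row_str]
  else lines

def render_asterism_cardinal (grid : List (List Bool)) : String :=
  let height : Int := (grid.length : Int)
  let width : Int := ((PySem.List.pyGetD grid 0 []).length : Int)
  let output_lines : List (List Char) :=
    (PySem.List.pyRange 0 height).foldl (pvAOuterStep grid height width) []
  String.mk (PySem.Chars.join ['\n'] output_lines)

-- ===== PORT B =====
def pvCellB (grid : List (List Bool)) (r c : Int) : Char :=
  let y := PySem.Int.floordiv r 2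
  let x := PySem.Int.floordiv c 3
  if PySem.Int.mod r 2 = 0 then
    if PySem.Int.mod c 3 = 0 then (if pvAt grid y x then '★' else '·')
    else (if pvAt grid y x && pvAt grid y (x + 1) then '─' else ' ')
  else
    if PySem.Int.mod c 3 = 0 then (if pvAt grid y x && pvAt grid (y + 1) x then '│' else ' ')
    else ' '

def render_asterism_cardinal_alt (grid : List (List Bool)) : String :=
  let height : Int := (grid.length : Int)
  let width : Int := ((PySem.List.pyGetD grid 0 []).length : Int)
  String.mk (PySem.Chars.join ['\n']
    ((PySem.List.pyRange 0 (2 * height - 1)).map (fun r =>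
      (PySem.List.pyRange 0 (3 * width - 2)).map (fun c => pvCellB grid r c))))

-- ===== PRECONDITION & SPEC =====
-- Pre_ excludes exactly the inputs on which the Python A raises IndexError: the empty
-- grid (len(grid[0])) and grids with a row shorter than the first row (the grid[y][x] reads).
def Pre_render_asterism_cardinal (grid : List (List Bool)) : Prop :=
  grid ≠ [] ∧ ∀ row ∈ grid, (grid.headI).length ≤ row.length
instance (grid : List (List Bool)) : Decidable (Pre_render_asterism_cardinal grid) := by
  unfold Pre_render_asterism_cardinal; infer_instance

def pvWitness_render_asterism_cardinal : List (List Bool) :=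
  [[true, false, true], [true, true, false]]

def Spec_render_asterism_cardinal (grid : List (List Bool)) (out : String) : Prop :=
  out = render_asterism_cardinal_alt grid
instance (grid : List (List Bool)) (out : String) : Decidable (Spec_render_asterism_cardinal grid out) := by
  unfold Spec_render_asterism_cardinal; infer_instance

-- ===== CLAIM (what is proved, stated in full; the proofs are below) =====
def Claim_equal_render_asterism_cardinal : Prop :=
  ∀ (grid : List (List Bool)), Dom_render_asterism_cardinal grid →
    Pre_render_asterism_cardinal grid →
    Spec_render_asterism_cardinal grid (render_asterism_cardinal grid)

-- ===== LEMMAS AND PROOFS =====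

-- proof-side names for the pieces A's loops accumulate
def pvLinkChar (g : List (List Bool)) (y x : Int) : Char :=
  if pvAt g y x && pvAt g y (x + 1) then '─' else ' '

def pvVChar (g : List (List Bool)) (y x : Int) : Char :=
  if pvAt g y x && pvAt g (y + 1) x then '│' else ' '

def pvStarSeg (g : List (List Bool)) (w y x : Int) : List Char :=
  (if pvAt g y x then '★' else '·') ::
    (if x < w - 1 then [pvLinkChar g y x, pvLinkChar g y x] else [])

def pvVSeg (g : List (List Bool)) (w y x : Int) : List Char :=
  pvVChar g y x :: (if x < w - 1 then [' ', ' '] else [])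

def pvRow (g : List (List Bool)) (w y : Int) : List Char :=
  (PySem.List.pyRange 0 w).flatMap (pvStarSeg g w y)

def pvLink (g : List (List Bool)) (w y : Int) : List Char :=
  (PySem.List.pyRange 0 w).flatMap (pvVSeg g w y)

theorem pvAStarStep_eq (g : List (List Bool)) (w y : Int) :
    pvAStarStep g w y = fun s x => s ++ pvStarSeg g w y x := by
  funext s x
  simp only [pvAStarStep, pvStarSeg, pvLinkChar]
  by_cases h1 : pvAt g y x <;> by_cases h2 : x < w - 1 <;>
    by_cases h3 : pvAt g y (x + 1) <;> simp [h1, h2, h3]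

theorem pvALinkStep_eq (g : List (List Bool)) (w y : Int) :
    pvALinkStep g w y = fun s x => s ++ pvVSeg g w y x := by
  funext s x
  simp only [pvALinkStep, pvVSeg, pvVChar]
  by_cases h1 : pvAt g y x && pvAt g (y + 1) x <;>
    by_cases h2 : x < w - 1 <;> simp [h1, h2]

theorem pvAOuterStep_eq (g : List (List Bool)) (h w : Int) :
    pvAOuterStep g h w = fun lines y =>
      lines ++ (pvRow g w y :: (if y < h - 1 then [pvLink g w y] else [])) := by
  funext lines y
  simp only [pvAOuterStep, pvAStarStep_eq, pvALinkStep_eq,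
    PySem.List.foldl_append_eq_flatMap, List.nil_append]
  by_cases hy : y < h - 1 <;> simp [hy, pvRow, pvLink]

-- A's nested folds produce exactly the star/link rows in sequence
theorem pvAshape (grid : List (List Bool)) :
    render_asterism_cardinal grid = String.mk (PySem.Chars.join ['\n']
      ((PySem.List.pyRange 0 (grid.length : Int)).flatMap (fun y =>
        pvRow grid ((PySem.List.pyGetD grid 0 []).length : Int) y ::
          (if y < (grid.length : Int) - 1
            then [pvLink grid ((PySem.List.pyGetD grid 0 []).length : Int) y] else [])))) := by
  simp only [render_asterism_cardinal, pvAOuterStep_eq,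
    PySem.List.foldl_append_eq_flatMap, List.nil_append]

-- one row of w+1 stars with 2-char connectors between them equals the 3w+1 canvas cells
theorem pvRowEq (w : Nat) : ∀ (S L : Nat → Char),
    (List.range (w + 1)).flatMap (fun x => S x :: (if x < w then [L x, L x] else []))
    = (List.range (3 * w + 1)).map (fun c => if c % 3 = 0 then S (c / 3) else L (c / 3)) := by
  induction w with
  | zero => intro S L; simp
  | succ w ih =>
    intro S L
    have h3 : 3 * (w + 1) + 1 = ((3 * w + 1) + 1) + 1 + 1 := by ring
    rw [h3]
    conv_lhs => rw [List.range_succ_eq_map]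
    conv_rhs => rw [List.range_succ_eq_map, List.range_succ_eq_map, List.range_succ_eq_map]
    simp only [List.flatMap_cons, List.flatMap_map, List.map_cons, List.map_map]
    have hf : (fun a => S (Nat.succ a) :: if Nat.succ a < w + 1 then [L (Nat.succ a), L (Nat.succ a)] else ([] : List Char))
        = (fun a => (S ∘ Nat.succ) a :: if a < w then [(L ∘ Nat.succ) a, (L ∘ Nat.succ) a] else []) := by
      funext a; simp [Function.comp]
    have hg : ((fun c => if c % 3 = 0 then S (c / 3) else L (c / 3)) ∘ Nat.succ ∘ Nat.succ ∘ Nat.succ)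
        = (fun c => if c % 3 = 0 then (S ∘ Nat.succ) (c / 3) else (L ∘ Nat.succ) (c / 3)) := by
      funext c
      simp only [Function.comp_apply]
      have hm : Nat.succ (Nat.succ (Nat.succ c)) % 3 = c % 3 := by omega
      have hd : Nat.succ (Nat.succ (Nat.succ c)) / 3 = c / 3 + 1 := by omega
      rw [hm, hd]
    rw [hf, hg, ih (S ∘ Nat.succ) (L ∘ Nat.succ)]
    simp

-- h+1 rendered rows with link rows between them equal the 2h+1 canvas rows
theorem pvInterEq (h : Nat) : ∀ (R K : Nat → List Char),
    (List.range (h + 1)).flatMap (fun y => R y :: (if y < h then [K y] else []))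
    = (List.range (2 * h + 1)).map (fun r => if r % 2 = 0 then R (r / 2) else K (r / 2)) := by
  induction h with
  | zero => intro R K; simp
  | succ h ih =>
    intro R K
    have h2 : 2 * (h + 1) + 1 = ((2 * h + 1) + 1) + 1 := by ring
    rw [h2]
    conv_lhs => rw [List.range_succ_eq_map]
    conv_rhs => rw [List.range_succ_eq_map, List.range_succ_eq_map]
    simp only [List.flatMap_cons, List.flatMap_map, List.map_cons, List.map_map]
    have hf : (fun a => R (Nat.succ a) :: if Nat.succ a < h + 1 then [K (Nat.succ a)] else ([] : List (List Char)))
        = (fun a => (R ∘ Nat.succ) a :: if a < h then [(K ∘ Nat.succ) a] else []) := by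
      funext a; simp [Function.comp]
    have hg : ((fun r => if r % 2 = 0 then R (r / 2) else K (r / 2)) ∘ Nat.succ ∘ Nat.succ)
        = (fun r => if r % 2 = 0 then (R ∘ Nat.succ) (r / 2) else (K ∘ Nat.succ) (r / 2)) := by
      funext r
      simp only [Function.comp_apply]
      have hm : Nat.succ (Nat.succ r) % 2 = r % 2 := by omega
      have hd : Nat.succ (Nat.succ r) / 2 = r / 2 + 1 := by omega
      rw [hm, hd]
    rw [hf, hg, ih (R ∘ Nat.succ) (K ∘ Nat.succ)]
    simp

-- B's canvas row r equals A's star row (even r) / link row (odd r)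
theorem pvBrow (grid : List (List Bool)) (w'' : Nat)
    (hw : ((PySem.List.pyGetD grid 0 []).length : Int) = ((w'' + 1 : Nat) : Int)) (r : Nat) :
    (PySem.List.pyRange 0 (3 * ((PySem.List.pyGetD grid 0 []).length : Int) - 2)).map
        (fun c => pvCellB grid (r : Int) c)
    = if r % 2 = 0 then pvRow grid ((PySem.List.pyGetD grid 0 []).length : Int) ((r / 2 : Nat) : Int)
      else pvLink grid ((PySem.List.pyGetD grid 0 []).length : Int) ((r / 2 : Nat) : Int) := by
  have hcol : 3 * ((PySem.List.pyGetD grid 0 []).length : Int) - 2 = ((3 * w'' + 1 : Nat) : Int) := by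
    rw [hw]; push_cast; ring
  rw [hcol, PySem.List.pyRange_zero_natCast, List.map_map]
  have hcond : ∀ (x : Nat), (((x : Nat) : Int) < ((PySem.List.pyGetD grid 0 []).length : Int) - 1) ↔ (x < w'') := by
    intro x; rw [hw]; push_cast; omega
  have hrowA : pvRow grid ((PySem.List.pyGetD grid 0 []).length : Int) ((r / 2 : Nat) : Int)
      = (List.range (3 * w'' + 1)).map (fun c => if c % 3 = 0
          then (if pvAt grid ((r / 2 : Nat) : Int) ((c / 3 : Nat) : Int) then '★' else '·')
          else pvLinkChar grid ((r / 2 : Nat) : Int) ((c / 3 : Nat) : Int)) := by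
    rw [pvRow, hw, PySem.List.pyRange_zero_natCast, List.flatMap_map,
        ← pvRowEq w'' (fun k => if pvAt grid ((r / 2 : Nat) : Int) ((k : Nat) : Int) then '★' else '·')
          (fun k => pvLinkChar grid ((r / 2 : Nat) : Int) ((k : Nat) : Int))]
    apply List.flatMap_congr
    intro x _
    simp only [pvStarSeg]
    congr 1
    rw [← hw]
    simp only [hcond x]
  have hlinkA : pvLink grid ((PySem.List.pyGetD grid 0 []).length : Int) ((r / 2 : Nat) : Int)
      = (List.range (3 * w'' + 1)).map (fun c => if c % 3 = 0
          then pvVChar grid ((r / 2 : Nat) : Int) ((c / 3 : Nat) : Int)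
          else ' ') := by
    rw [pvLink, hw, PySem.List.pyRange_zero_natCast, List.flatMap_map,
        ← pvRowEq w'' (fun k => pvVChar grid ((r / 2 : Nat) : Int) ((k : Nat) : Int))
          (fun _ => ' ')]
    apply List.flatMap_congr
    intro x _
    simp only [pvVSeg]
    congr 1
    rw [← hw]
    simp only [hcond x]
  have hy : PySem.Int.floordiv (r : Int) 2 = ((r / 2 : Nat) : Int) := PySem.Int.floordiv_natCast r 2
  have hm2 : PySem.Int.mod (r : Int) 2 = ((r % 2 : Nat) : Int) := PySem.Int.mod_natCast r 2
  by_cases hr : r % 2 = 0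
  · rw [if_pos hr, hrowA]
    apply List.map_congr_left
    intro c _
    have hx : PySem.Int.floordiv (c : Int) 3 = ((c / 3 : Nat) : Int) := PySem.Int.floordiv_natCast c 3
    have hm3 : PySem.Int.mod (c : Int) 3 = ((c % 3 : Nat) : Int) := PySem.Int.mod_natCast c 3
    by_cases hc : c % 3 = 0
    · simp only [Function.comp_apply, pvCellB, hy, hx, hm2, hm3, Nat.cast_eq_zero, pvLinkChar]
      rw [if_pos hr, if_pos hc]
    · simp only [Function.comp_apply, pvCellB, hy, hx, hm2, hm3, Nat.cast_eq_zero, pvLinkChar]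
      rw [if_pos hr, if_neg hc]
  · rw [if_neg hr, hlinkA]
    apply List.map_congr_left
    intro c _
    have hx : PySem.Int.floordiv (c : Int) 3 = ((c / 3 : Nat) : Int) := PySem.Int.floordiv_natCast c 3
    have hm3 : PySem.Int.mod (c : Int) 3 = ((c % 3 : Nat) : Int) := PySem.Int.mod_natCast c 3
    by_cases hc : c % 3 = 0
    · simp only [Function.comp_apply, pvCellB, hy, hx, hm2, hm3, Nat.cast_eq_zero, pvVChar]
      rw [if_neg hr, if_pos hc]
    · simp only [Function.comp_apply, pvCellB, hy, hx, hm2, hm3, Nat.cast_eq_zero, pvVChar]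
      rw [if_neg hr, if_neg hc]

-- ===== VERDICT (by name: the statement is the Claim_ definition above) =====
theorem render_asterism_cardinal_spec : Claim_equal_render_asterism_cardinal := by
  intro grid _ hpre
  obtain ⟨hne, _⟩ := hpre
  obtain ⟨g0, gs, rfl⟩ : ∃ g0 gs, grid = g0 :: gs := by
    cases grid with
    | nil => exact absurd rfl hne
    | cons a l => exact ⟨a, l, rfl⟩
  unfold Spec_render_asterism_cardinal
  rw [pvAshape]
  simp only [render_asterism_cardinal_alt]
  congr 1
  congr 1
  have hH : (((g0 :: gs).length : Nat) : Int) = ((gs.length + 1 : Nat) : Int) := by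
    simp [List.length_cons]
  have hrows : 2 * ((gs.length + 1 : Nat) : Int) - 1 = ((2 * gs.length + 1 : Nat) : Int) := by
    push_cast; ring
  rw [hH, hrows, PySem.List.pyRange_zero_natCast, PySem.List.pyRange_zero_natCast,
      List.flatMap_map, List.map_map]
  have hcondy : ∀ (y : Nat), (((y : Nat) : Int) < ((gs.length + 1 : Nat) : Int) - 1) ↔ (y < gs.length) := by
    intro y; push_cast; omega
  simp only [Function.comp_def, hcondy]
  rw [pvInterEq gs.length
      (fun k => pvRow (g0 :: gs) ((PySem.List.pyGetD (g0 :: gs) 0 []).length : Int) ((k : Nat) : Int))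
      (fun k => pvLink (g0 :: gs) ((PySem.List.pyGetD (g0 :: gs) 0 []).length : Int) ((k : Nat) : Int))]
  apply (List.map_congr_left _).symm
  intro r _
  cases g0 with
  | nil =>
    have hw0 : ((PySem.List.pyGetD (([] : List Bool) :: gs) 0 []).length : Int) = 0 := by
      simp [PySem.List.pyGetD_zero_cons]
    rw [hw0]
    have hempty : PySem.List.pyRange 0 (3 * (0 : Int) - 2) = [] := by decide
    have hzero : PySem.List.pyRange 0 (0 : Int) = [] := by decide
    rw [hempty]
    by_cases hr : r % 2 = 0 <;> simp [hr, pvRow, pvLink, hzero]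
  | cons b bs =>
    have hw : ((PySem.List.pyGetD ((b :: bs) :: gs) 0 []).length : Int) = ((bs.length + 1 : Nat) : Int) := by
      simp [PySem.List.pyGetD_zero_cons]
    exact pvBrow ((b :: bs) :: gs) bs.length hw r
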